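-- pv_equiv track=rewrite | github.com/claushorn/geometric_protein_optimization | GPO_algorithms/buildup.py | process_importancesAll
-- ===== SOURCE A (Python) =====
-- def process_importancesAll(importancesAll):
--     maxImportancesAll = []
--     mAAperSite = []
--     for mimportances in importancesAll:
--         maxI = max([e[1] for e in mimportances])
--         maxImportancesAll.append(maxI)
--         mAAperSite.append( [aa for aa,I in mimportances if I==maxI][0] )
--     return maxImportancesAll, mAAperSite
-- ===== SOURCE B (Python) =====
-- def process_importancesAll(importancesAll):
--     maxImportancesAll = []
--     mAAperSite = []
--     for mimportances in importancesAll: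
--         bestAA, best = mimportances[0]
--         for aa, I in mimportances[1:]:
--             if I > best:
--                 best, bestAA = I, aa
--         maxImportancesAll.append(best)
--         mAAperSite.append(bestAA)
--     return maxImportancesAll, mAAperSite
-- ===== Notes on version B (the rewrite author's own statement) =====
-- stated objective: faster
-- what changed: Replaces per-site max() plus a re-scanning filter comprehension with a single running best/bestAA traversal of each site.
import Mathlib
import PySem

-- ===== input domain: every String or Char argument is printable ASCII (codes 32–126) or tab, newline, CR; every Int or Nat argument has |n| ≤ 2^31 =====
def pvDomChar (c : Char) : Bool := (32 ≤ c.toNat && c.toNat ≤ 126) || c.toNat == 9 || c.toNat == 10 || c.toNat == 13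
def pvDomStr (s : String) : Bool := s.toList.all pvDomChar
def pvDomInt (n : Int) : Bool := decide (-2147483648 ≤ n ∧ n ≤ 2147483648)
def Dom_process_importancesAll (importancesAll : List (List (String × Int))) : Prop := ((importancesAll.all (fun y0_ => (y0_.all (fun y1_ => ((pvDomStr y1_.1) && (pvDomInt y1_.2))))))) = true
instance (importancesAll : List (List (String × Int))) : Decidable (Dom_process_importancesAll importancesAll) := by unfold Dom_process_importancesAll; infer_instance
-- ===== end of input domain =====

-- B replaces A's per-site max() + re-scanning filter comprehension with one running best/bestAA pass per site;
-- equivalence is on the return value only (neither mutates its argument).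

-- ===== PORT A =====
-- maxI = max([e[1] for e in mimportances]); first aa with I == maxI.
-- max?/head? return none exactly where Python raises (empty site); the .getD defaults are
-- unreachable under Pre_process_importancesAll.
def pvSiteA (m : List (String × Int)) : Int × String :=
  let maxI := (PySem.List.max? (m.map (fun e => e.2)) (fun y => y)).getD 0
  (maxI, ((((m.filter (fun p => p.2 == maxI)).map (fun p => p.1)).head?).getD ""))

def process_importancesAll (importancesAll : List (List (String × Int))) : List Int × List String :=
  importancesAll.foldl
    (fun acc m => (acc.1 ++ [(pvSiteA m).1], acc.2 ++ [(pvSiteA m).2]))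
    ([], [])

-- ===== PORT B =====
-- single pass: strict-greater update of (best, bestAA)
def pvBLoop (rest : List (String × Int)) (best : Int) (bestAA : String) : Int × String :=
  match rest with
  | [] => (best, bestAA)
  | (aa, I) :: t => if best < I then pvBLoop t I aa else pvBLoop t best bestAA

-- B's `mimportances[0]` raises on an empty site; the (0, "") arm is unreachable under Pre_.
def pvSiteB (m : List (String × Int)) : Int × String :=
  match m with
  | [] => (0, "")
  | (aa, I) :: t => pvBLoop t I aa

def process_importancesAll_alt (importancesAll : List (List (String × Int))) : List Int × List String :=
  importancesAll.foldl
    (fun acc m => (acc.1 ++ [(pvSiteB m).1], acc.2 ++ [(pvSiteB m).2]))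
    ([], [])

-- ===== PRECONDITION & SPEC =====
-- Pre_ excludes inputs with an empty site list, on which A's max() raises ValueError (B's m[0] also raises).
def Pre_process_importancesAll (importancesAll : List (List (String × Int))) : Prop :=
  ∀ m ∈ importancesAll, m ≠ []
instance (importancesAll : List (List (String × Int))) : Decidable (Pre_process_importancesAll importancesAll) := by unfold Pre_process_importancesAll; infer_instance

def pvWitness_process_importancesAll : (List (List (String × Int))) :=
  [[("A", 1), ("C", 3), ("D", 3)], [("G", -2)]]

def Spec_process_importancesAll (importancesAll : List (List (String × Int))) (out : List Int × List String) : Prop := out = process_importancesAll_alt importancesAll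
instance (importancesAll : List (List (String × Int))) (out : List Int × List String) : Decidable (Spec_process_importancesAll importancesAll out) := by unfold Spec_process_importancesAll; infer_instance

-- ===== CLAIM (what is proved, stated in full; the proofs are below) =====
def Claim_equal_process_importancesAll : Prop := ∀ (importancesAll : List (List (String × Int))), Dom_process_importancesAll importancesAll → Pre_process_importancesAll importancesAll → Spec_process_importancesAll importancesAll (process_importancesAll importancesAll)

-- ===== LEMMAS AND PROOFS =====

-- first aa in m whose importance equals v (A's comprehension-head, as a named function)
def pvFirstAA (m : List (String × Int)) (v : Int) : String :=
  ((((m.filter (fun p => p.2 == v)).map (fun p => p.1)).head?).getD "")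

lemma pvBest_ge (t : List (String × Int)) (best : Int) :
    best ≤ (t.map (fun e => e.2)).foldl max best := by
  induction t generalizing best with
  | nil => simp
  | cons p t ih => simpa using le_trans (le_max_left best p.2) (ih (max best p.2))

-- loop invariant: pvBLoop computes the running max and the first strict improver's aa
lemma pvBLoop_spec (t : List (String × Int)) (best : Int) (bestAA : String) :
    pvBLoop t best bestAA =
      (((t.map (fun e => e.2)).foldl max best),
       if (t.map (fun e => e.2)).foldl max best ≤ best then bestAA
       else pvFirstAA t ((t.map (fun e => e.2)).foldl max best)) := by
  induction t generalizing best bestAA with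
  | nil => simp [pvBLoop]
  | cons p t ih =>
    obtain ⟨aa, I⟩ := p
    simp only [pvBLoop, List.map_cons, List.foldl_cons]
    by_cases h : best < I
    · rw [if_pos h, ih, max_eq_right (le_of_lt h)]
      have hge := pvBest_ge t I
      simp only [Prod.mk.injEq, true_and]
      by_cases hle : (t.map (fun e => e.2)).foldl max I ≤ I
      · have heq : (t.map (fun e => e.2)).foldl max I = I := le_antisymm hle hge
        simp [heq, not_le.mpr h, pvFirstAA]
      · have hne : ¬ (t.map (fun e => e.2)).foldl max I ≤ best :=
          fun hc => hle (le_trans hc (le_of_lt h))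
        have hIne : I ≠ (t.map (fun e => e.2)).foldl max I :=
          fun hc => hle (le_of_eq hc.symm)
        simp [hle, hne, pvFirstAA, hIne]
    · rw [if_neg h, ih, max_eq_left (le_of_not_gt h)]
      simp only [Prod.mk.injEq, true_and]
      by_cases hle : (t.map (fun e => e.2)).foldl max best ≤ best
      · simp [hle]
      · have hIne : I ≠ (t.map (fun e => e.2)).foldl max best :=
          fun hc => hle (hc ▸ le_of_not_gt h)
        simp [hle, pvFirstAA, hIne]

-- per-site agreement on a nonempty site
lemma pvSite_eq (m : List (String × Int)) (hm : m ≠ []) : pvSiteA m = pvSiteB m := by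
  obtain ⟨⟨aa, I⟩, t, rfl⟩ := List.exists_cons_of_ne_nil hm
  simp only [pvSiteA, pvSiteB, List.map_cons]
  rw [PySem.List.max?_id_cons, pvBLoop_spec]
  set M := (t.map (fun e => e.2)).foldl max I with hM
  have hge := pvBest_ge t I
  simp only [Option.getD_some, Prod.mk.injEq, true_and]
  by_cases hle : M ≤ I
  · have heq : M = I := le_antisymm hle hge
    simp [heq]
  · have hIne : (I == M) = false := by
      simp only [beq_eq_false_iff_ne]; intro hc; exact hle (le_of_eq hc.symm)
    simp [hle, pvFirstAA, hIne]

lemma pvFold_eq (xs : List (List (String × Int))) (h : ∀ m ∈ xs, m ≠ []) :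
    ∀ acc : List Int × List String,
      xs.foldl (fun acc m => (acc.1 ++ [(pvSiteA m).1], acc.2 ++ [(pvSiteA m).2])) acc =
      xs.foldl (fun acc m => (acc.1 ++ [(pvSiteB m).1], acc.2 ++ [(pvSiteB m).2])) acc := by
  induction xs with
  | nil => intro acc; rfl
  | cons m t ih =>
    intro acc
    simp only [List.foldl_cons]
    rw [pvSite_eq m (h m (by simp))]
    exact ih (fun x hx => h x (by simp [hx])) _

-- ===== VERDICT (by name: the statement is the Claim_ definition above) =====
theorem process_importancesAll_spec : Claim_equal_process_importancesAll := by
  intro xs _ hpre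
  unfold Spec_process_importancesAll process_importancesAll process_importancesAll_alt
  exact pvFold_eq xs hpre _
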